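-- pv_equiv track=rewrite | github.com/rioredwards/fz-cmd | generate-tldr-cache.py | extract_description_from_tldr
-- ===== SOURCE A (Python) =====
-- def extract_description_from_tldr(content):
--     """Extract description from tldr content.
--
--     RULE: Description
--     - Skip the first line (command name)
--     - Skip the next line if it's empty
--     - The description is the FIRST non-empty line after the command name
--     - Stop at lines that start with "See also:", "More information:", or "- " (example descriptions)
--     """
--     lines = content.split('\n')
--
--     # Skip first line (command name)
--     skip_first = True
--     for line in lines:
--         line_stripped = line.strip()
--
--         # Skip first non-empty line (command name)
--         if skip_first and line_stripped:
--             skip_first = False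
--             continue
--
--         # Skip empty lines
--         if not line_stripped:
--             continue
--
--         # Stop at metadata lines
--         if line_stripped.startswith('See also:') or line_stripped.startswith('More information:'):
--             break
--
--         # Stop at example descriptions
--         if line_stripped.startswith('- '):
--             break
--
--         # Found description
--         return line_stripped[:200]  # Limit to 200 chars
--
--     return None
-- ===== SOURCE B (Python) =====
-- def extract_description_from_tldr(content):
--     non_empty = [l.strip() for l in content.split('\n') if l.strip()]
--     if len(non_empty) < 2:
--         return None
--     d = non_empty[1]
--     if d.startswith('See also:') or d.startswith('More information:') or d.startswith('- '):
--         return None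
--     return d[:200]
-- ===== Notes on version B (the rewrite author's own statement) =====
-- stated objective: simpler
-- what changed: Replaces the skip_first state-machine loop with a filter-then-index decomposition: build the list of non-empty stripped lines once and read the second element.
import Mathlib
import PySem

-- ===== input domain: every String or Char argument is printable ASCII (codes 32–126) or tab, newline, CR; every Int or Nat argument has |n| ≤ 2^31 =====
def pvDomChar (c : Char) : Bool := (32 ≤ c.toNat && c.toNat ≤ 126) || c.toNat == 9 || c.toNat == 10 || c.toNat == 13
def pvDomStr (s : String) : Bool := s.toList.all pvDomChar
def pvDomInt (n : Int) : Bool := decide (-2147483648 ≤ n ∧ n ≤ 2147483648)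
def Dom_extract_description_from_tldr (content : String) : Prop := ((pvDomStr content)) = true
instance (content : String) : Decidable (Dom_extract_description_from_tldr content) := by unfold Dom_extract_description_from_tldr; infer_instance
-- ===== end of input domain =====

-- B is a simpler filter-then-index decomposition of A's skip_first state-machine loop; same return value everywhere.

-- ===== PORT A =====
-- the loop over lines with the skip_first flag; early return/break become the recursion's results
def extractLoopA : List String → Bool → Option String
  | [], _ => none
  | line :: rest, skipFirst =>
    let ls := PySem.Str.strip line
    if skipFirst && !(ls == "") then extractLoopA rest false
    else if ls == "" then extractLoopA rest skipFirst
    else if PySem.Str.startswith ls "See also:" || PySem.Str.startswith ls "More information:" then none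
    else if PySem.Str.startswith ls "- " then none
    else some (PySem.Str.slice ls none (some 200))

def extract_description_from_tldr (content : String) : Option String :=
  extractLoopA ((PySem.Str.split? content "\n").getD []) true

-- ===== PORT B =====
def extract_description_from_tldr_alt (content : String) : Option String :=
  let nonEmpty := (((PySem.Str.split? content "\n").getD []).map PySem.Str.strip).filter (fun l => !(l == ""))
  if nonEmpty.length < 2 then none
  else
    match PySem.List.pyGet? nonEmpty 1 with
    | none => none
    | some d =>
      if PySem.Str.startswith d "See also:" || PySem.Str.startswith d "More information:"
         || PySem.Str.startswith d "- " then none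
      else some (PySem.Str.slice d none (some 200))

-- ===== PRECONDITION & SPEC =====
def Spec_extract_description_from_tldr (content : String) (out : Option String) : Prop := out = extract_description_from_tldr_alt content
instance (content : String) (out : Option String) : Decidable (Spec_extract_description_from_tldr content out) := by unfold Spec_extract_description_from_tldr; infer_instance

-- ===== CLAIM (what is proved, stated in full; the proofs are below) =====
def Claim_equal_extract_description_from_tldr : Prop := ∀ (content : String), Dom_extract_description_from_tldr content → Spec_extract_description_from_tldr content (extract_description_from_tldr content)

-- ===== LEMMAS AND PROOFS =====

-- what A's loop does once the command-name line has been skipped: decide on the first non-empty stripped line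
def descOf (xs : List String) : Option String :=
  match xs with
  | [] => none
  | d :: _ =>
    if PySem.Str.startswith d "See also:" || PySem.Str.startswith d "More information:"
       || PySem.Str.startswith d "- " then none
    else some (PySem.Str.slice d none (some 200))

theorem extractLoopA_false (ls : List String) :
    extractLoopA ls false = descOf ((ls.map PySem.Str.strip).filter (fun l => !(l == ""))) := by
  induction ls with
  | nil => rfl
  | cons l rest ih =>
    simp only [extractLoopA, List.map_cons, List.filter_cons]
    by_cases h : PySem.Str.strip l == ""
    · simp [h, ih]
    · simp only [h]
      simp only [Bool.false_and, Bool.not_false]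
      simp [descOf]
      by_cases h1 : PySem.Str.startswith (PySem.Str.strip l) "See also:" ||
          PySem.Str.startswith (PySem.Str.strip l) "More information:" <;>
        by_cases h2 : PySem.Str.startswith (PySem.Str.strip l) "- " <;>
        simp_all

theorem extractLoopA_true (ls : List String) :
    extractLoopA ls true =
      descOf (((ls.map PySem.Str.strip).filter (fun l => !(l == ""))).tail) := by
  induction ls with
  | nil => rfl
  | cons l rest ih =>
    simp only [extractLoopA, List.map_cons, List.filter_cons]
    by_cases h : PySem.Str.strip l == ""
    · simp [h, ih]
    · simp [h, extractLoopA_false]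

-- ===== VERDICT (by name: the statement is the Claim_ definition above) =====
theorem extract_description_from_tldr_spec : Claim_equal_extract_description_from_tldr := by
  intro content _
  unfold Spec_extract_description_from_tldr
  unfold extract_description_from_tldr extract_description_from_tldr_alt
  rw [extractLoopA_true]
  set xs := (((PySem.Str.split? content "\n").getD []).map PySem.Str.strip).filter (fun l => !(l == "")) with hxs
  match xs with
  | [] => rfl
  | [a] => rfl
  | a :: d :: t =>
    simp [descOf, PySem.List.pyGet?, PySem.List.pyIdx?]
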